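-- pv_equiv track=rewrite | github.com/yilinzhang130/BDGO | api/services/document/rnpv/qc.py | _check_loe_erosion
-- ===== SOURCE A (Python) =====
-- def _check_loe_erosion(rev_vals):
--     if not rev_vals or len(rev_vals) <= 5:
--         return None
--     last5 = rev_vals[-5:]
--     declines = any(last5[i] < last5[i - 1] for i in range(1, len(last5)))
--     return (
--         "LOE erosion visible",
--         "PASS" if declines else "WARN",
--         "Revenue declines" if declines else "Still growing",
--         "Post-LOE decline",
--     )
-- ===== SOURCE B (Python) =====
-- def _check_loe_erosion(rev_vals):
--     if len(rev_vals) > 5: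
--         def drops(xs):
--             if len(xs) < 2:
--                 return False
--             return xs[1] < xs[0] or drops(xs[1:])
--         if drops(rev_vals[-5:]):
--             return ("LOE erosion visible", "PASS", "Revenue declines", "Post-LOE decline")
--         return ("LOE erosion visible", "WARN", "Still growing", "Post-LOE decline")
--     return None
-- ===== Notes on version B (the rewrite author's own statement) =====
-- stated objective: simpler
-- what changed: Replaces the index/range pairwise scan over the 5-window with a structural recursion ('drops') over adjacent heads, inverts the guard (len > 5, absorbing the redundant emptiness test) and returns each tuple directly instead of threading a boolean through conditional fields.
import Mathlib
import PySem

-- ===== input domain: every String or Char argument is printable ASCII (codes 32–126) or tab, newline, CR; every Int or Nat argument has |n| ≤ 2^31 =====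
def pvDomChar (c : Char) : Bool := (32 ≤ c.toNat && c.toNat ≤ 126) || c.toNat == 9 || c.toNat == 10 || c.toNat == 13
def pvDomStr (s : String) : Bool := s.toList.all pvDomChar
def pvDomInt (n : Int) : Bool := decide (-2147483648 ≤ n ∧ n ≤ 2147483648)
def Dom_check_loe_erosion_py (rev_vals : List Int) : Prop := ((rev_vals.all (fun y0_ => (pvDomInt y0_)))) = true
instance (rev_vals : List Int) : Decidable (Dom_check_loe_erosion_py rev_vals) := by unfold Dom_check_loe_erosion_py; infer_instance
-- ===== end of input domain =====

-- B replaces the index/range pairwise scan with a structural recursion over the 5-window and an inverted guard; simpler, same cost.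


-- ===== PORT A =====
def check_loe_erosion_py (rev_vals : List Int) : Option (String × String × String × String) :=
  if rev_vals = [] ∨ rev_vals.length ≤ 5 then none
  else
    let last5 := PySem.List.slice rev_vals (some (-5)) none
    let declines := (PySem.List.pyRange 1 (last5.length : Int) 1).any
      (fun i => decide (PySem.List.pyGetD last5 i 0 < PySem.List.pyGetD last5 (i - 1) 0))
    some ("LOE erosion visible",
          if declines then "PASS" else "WARN",
          if declines then "Revenue declines" else "Still growing",
          "Post-LOE decline")

-- ===== PORT B =====
-- recursive helper 'drops' from Source B: an adjacent strict decline in the list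
def dropsB : List Int → Bool
  | x :: y :: rest => decide (y < x) || dropsB (y :: rest)
  | _ => false

def check_loe_erosion_py_alt (rev_vals : List Int) : Option (String × String × String × String) :=
  if 5 < rev_vals.length then
    if dropsB (PySem.List.slice rev_vals (some (-5)) none) then
      some ("LOE erosion visible", "PASS", "Revenue declines", "Post-LOE decline")
    else
      some ("LOE erosion visible", "WARN", "Still growing", "Post-LOE decline")
  else none

-- ===== PRECONDITION & SPEC =====
def Spec_check_loe_erosion_py (rev_vals : List Int) (out : Option (String × String × String × String)) : Prop := out = check_loe_erosion_py_alt rev_vals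
instance (rev_vals : List Int) (out : Option (String × String × String × String)) : Decidable (Spec_check_loe_erosion_py rev_vals out) := by unfold Spec_check_loe_erosion_py; infer_instance

-- ===== CLAIM =====
def Claim_equal_check_loe_erosion_py : Prop := ∀ (rev_vals : List Int), Dom_check_loe_erosion_py rev_vals → Spec_check_loe_erosion_py rev_vals (check_loe_erosion_py rev_vals)

-- ===== LEMMAS AND PROOFS =====

-- the two "declines" booleans agree on any 5-element window
lemma declines_eq (a b c d e : Int) :
    (PySem.List.pyRange 1 (([a, b, c, d, e] : List Int).length : Int) 1).any
      (fun i => decide (PySem.List.pyGetD [a, b, c, d, e] i 0 < PySem.List.pyGetD [a, b, c, d, e] (i - 1) 0))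
    = dropsB [a, b, c, d, e] := by
  rw [show (([a, b, c, d, e] : List Int).length : Int) = 5 by simp,
     show PySem.List.pyRange 1 5 1 = [1, 2, 3, 4] by decide, Bool.eq_iff_iff]
  simp [PySem.List.pyGetD, PySem.List.pyIdx?, PySem.List.pyGet?, dropsB]

-- ===== VERDICT =====
theorem check_loe_erosion_py_spec : Claim_equal_check_loe_erosion_py := by
  intro rev_vals _
  unfold Spec_check_loe_erosion_py check_loe_erosion_py check_loe_erosion_py_alt
  by_cases h : 5 < rev_vals.length
  · have hne : ¬ (rev_vals = [] ∨ rev_vals.length ≤ 5) := by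
      rintro (he | hle)
      · simp [he] at h
      · omega
    simp only [hne, if_false, h, if_true]
    have hlen : (PySem.List.slice rev_vals (some (-5)) none).length = 5 := by
      simp [PySem.List.slice, PySem.List.clampIdx]
      split <;> omega
    match hsl : PySem.List.slice rev_vals (some (-5)) none, hlen with
    | [a, b, c, d, e], _ =>
      rw [declines_eq]
      by_cases hd : dropsB [a, b, c, d, e] <;> simp [hd]
  · have : rev_vals = [] ∨ rev_vals.length ≤ 5 := by
      right; omega
    simp [this, h]
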